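-- pv_equiv track=rewrite | github.com/A-Thousand-Suns/Uni_Lorraine | NLPLab/lab9_10/utils.py | check_hexacolor
-- ===== SOURCE A (Python) =====
-- def check_hexacolor(color_str):
--     num = ['0', '1', '2', '3', '4', '5', '6', '7', '8', '9']
--     letter = ['a', 'b', 'c', 'd', 'e', 'f']
--     if (color_str[0]!= '#') or len(color_str)!=7:
--         return False
--     for i in color_str[1:]:
--         if (i not in num) and (i not in letter):
--             return False
--     return True
-- ===== SOURCE B (Python) =====
-- def _parse_hex6(s, acc=0):
--     """Parse s as a lowercase base-16 number left to right; value or None."""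
--     if s == "":
--         return acc
--     o = ord(s[0])
--     if 48 <= o <= 57:
--         d = o - 48
--     elif 97 <= o <= 102:
--         d = o - 87
--     else:
--         return None
--     return _parse_hex6(s[1:], acc * 16 + d)
--
-- def check_hexacolor(color_str):
--     if color_str[0] != '#' or len(color_str) != 7:
--         return False
--     return _parse_hex6(color_str[1:]) is not None
-- ===== Notes on version B (the rewrite author's own statement) =====
-- stated objective: alternative
-- what changed: Replaces A's iterative early-return loop over two hand-written digit/letter membership lists with a recursive base-16 parser that converts each character to its hex value by ordinal-range arithmetic (validity = the parse succeeds); Pre_ excludes only the empty string, where both A and B raise IndexError on the first-character access.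
import Mathlib
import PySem

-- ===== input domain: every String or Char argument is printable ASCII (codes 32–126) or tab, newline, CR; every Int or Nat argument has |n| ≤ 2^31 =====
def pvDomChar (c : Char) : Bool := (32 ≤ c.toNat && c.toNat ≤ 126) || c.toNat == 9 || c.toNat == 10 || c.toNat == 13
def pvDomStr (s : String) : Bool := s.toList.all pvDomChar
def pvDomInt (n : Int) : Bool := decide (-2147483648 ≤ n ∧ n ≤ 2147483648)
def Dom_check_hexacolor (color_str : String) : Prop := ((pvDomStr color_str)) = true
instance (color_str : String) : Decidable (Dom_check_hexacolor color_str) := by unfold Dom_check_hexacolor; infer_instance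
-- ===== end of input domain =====

-- B replaces A's membership-list loop with a recursive lowercase base-16 parser
-- (ordinal-range arithmetic; validity = the parse succeeds); same result wherever A returns.

-- ===== PORT A =====
-- the 'for i in color_str[1:]' loop with its early 'return False'
def chkLoopA (num letter : List Char) : List Char → Bool
  | [] => true
  | c :: rest => if c ∉ num ∧ c ∉ letter then false else chkLoopA num letter rest

def check_hexacolor (color_str : String) : Bool :=
  let num := ['0', '1', '2', '3', '4', '5', '6', '7', '8', '9']
  let letter := ['a', 'b', 'c', 'd', 'e', 'f']
  -- color_str[0]: IndexError on the empty string is excluded by Pre_; getD is never the taken branch there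
  if ((PySem.Str.pyGet? color_str 0).getD ' ' ≠ '#') ∨ PySem.Str.len color_str ≠ 7 then false
  else chkLoopA num letter (PySem.Str.slice color_str (some 1) none).toList

-- ===== PORT B =====
-- _parse_hex6: recursion 's[0] / s[1:]' ported as head/tail recursion on the char list (exact)
def parseHex6 : List Char → Int → Option Int
  | [], acc => some acc
  | c :: rest, acc =>
      let o : Int := c.toNat
      if 48 ≤ o ∧ o ≤ 57 then parseHex6 rest (acc * 16 + (o - 48))
      else if 97 ≤ o ∧ o ≤ 102 then parseHex6 rest (acc * 16 + (o - 87))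
      else none

def check_hexacolor_alt (color_str : String) : Bool :=
  if ((PySem.Str.pyGet? color_str 0).getD ' ' ≠ '#') ∨ PySem.Str.len color_str ≠ 7 then false
  else (parseHex6 (PySem.Str.slice color_str (some 1) none).toList 0).isSome

-- ===== PRECONDITION & SPEC =====
-- Pre_ excludes exactly the empty string, on which both A and B raise IndexError at color_str[0].
def Pre_check_hexacolor (color_str : String) : Prop := color_str ≠ ""
instance (color_str : String) : Decidable (Pre_check_hexacolor color_str) := by
  unfold Pre_check_hexacolor; infer_instance
def pvWitness_check_hexacolor : String := "#a1b2c3"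

def Spec_check_hexacolor (color_str : String) (out : Bool) : Prop := out = check_hexacolor_alt color_str
instance (color_str : String) (out : Bool) : Decidable (Spec_check_hexacolor color_str out) := by
  unfold Spec_check_hexacolor; infer_instance

-- ===== CLAIM (what is proved, stated in full; the proofs are below) =====
def Claim_equal_check_hexacolor : Prop := ∀ (color_str : String), Dom_check_hexacolor color_str → Pre_check_hexacolor color_str → Spec_check_hexacolor color_str (check_hexacolor color_str)

-- ===== LEMMAS AND PROOFS =====

-- a character passes A's membership test iff its code is in one of B's two ordinal ranges
set_option maxRecDepth 4000 in
theorem mem_iff_range (c : Char) :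
    (decide (c ∈ ['0', '1', '2', '3', '4', '5', '6', '7', '8', '9']) ||
     decide (c ∈ ['a', 'b', 'c', 'd', 'e', 'f'])) =
    ((decide (48 ≤ (c.toNat : Int) ∧ (c.toNat : Int) ≤ 57)) ||
     (decide (97 ≤ (c.toNat : Int) ∧ (c.toNat : Int) ≤ 102))) := by
  rw [Bool.eq_iff_iff]
  simp only [Bool.or_eq_true, decide_eq_true_eq, List.mem_cons, List.not_mem_nil, or_false]
  constructor
  · rintro (h | h)
    · rcases h with h | h | h | h | h | h | h | h | h | h <;> subst h <;> decide
    · rcases h with h | h | h | h | h | h <;> subst h <;> decide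
  · have hinj : ∀ d : Char, c.toNat = d.toNat → c = d := by
      intro d h
      exact Char.ext (UInt32.toNat_inj.mp h)
    rintro (⟨h1, h2⟩ | ⟨h1, h2⟩)
    · left
      have h48 : c.toNat = 48 ∨ c.toNat = 49 ∨ c.toNat = 50 ∨ c.toNat = 51 ∨ c.toNat = 52 ∨
          c.toNat = 53 ∨ c.toNat = 54 ∨ c.toNat = 55 ∨ c.toNat = 56 ∨ c.toNat = 57 := by omega
      rcases h48 with h | h | h | h | h | h | h | h | h | h <;>
        [ (exact Or.inl (hinj '0' (by rw [h]; rfl)));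
          (exact Or.inr (Or.inl (hinj '1' (by rw [h]; rfl))));
          (exact Or.inr (Or.inr (Or.inl (hinj '2' (by rw [h]; rfl)))));
          (exact Or.inr (Or.inr (Or.inr (Or.inl (hinj '3' (by rw [h]; rfl))))));
          (exact Or.inr (Or.inr (Or.inr (Or.inr (Or.inl (hinj '4' (by rw [h]; rfl)))))));
          (exact Or.inr (Or.inr (Or.inr (Or.inr (Or.inr (Or.inl (hinj '5' (by rw [h]; rfl))))))));
          (exact Or.inr (Or.inr (Or.inr (Or.inr (Or.inr (Or.inr (Or.inl (hinj '6' (by rw [h]; rfl)))))))));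
          (exact Or.inr (Or.inr (Or.inr (Or.inr (Or.inr (Or.inr (Or.inr (Or.inl (hinj '7' (by rw [h]; rfl))))))))));
          (exact Or.inr (Or.inr (Or.inr (Or.inr (Or.inr (Or.inr (Or.inr (Or.inr (Or.inl (hinj '8' (by rw [h]; rfl)))))))))));
          (exact Or.inr (Or.inr (Or.inr (Or.inr (Or.inr (Or.inr (Or.inr (Or.inr (Or.inr (hinj '9' (by rw [h]; rfl)))))))))))]
    · right
      have h97 : c.toNat = 97 ∨ c.toNat = 98 ∨ c.toNat = 99 ∨ c.toNat = 100 ∨ c.toNat = 101 ∨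
          c.toNat = 102 := by omega
      rcases h97 with h | h | h | h | h | h <;>
        [ (exact Or.inl (hinj 'a' (by rw [h]; rfl)));
          (exact Or.inr (Or.inl (hinj 'b' (by rw [h]; rfl))));
          (exact Or.inr (Or.inr (Or.inl (hinj 'c' (by rw [h]; rfl)))));
          (exact Or.inr (Or.inr (Or.inr (Or.inl (hinj 'd' (by rw [h]; rfl))))));
          (exact Or.inr (Or.inr (Or.inr (Or.inr (Or.inl (hinj 'e' (by rw [h]; rfl)))))));
          (exact Or.inr (Or.inr (Or.inr (Or.inr (Or.inr (hinj 'f' (by rw [h]; rfl)))))))]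

theorem parseHex6_isSome (l : List Char) (acc : Int) :
    (parseHex6 l acc).isSome =
      l.all (fun c => (decide (48 ≤ (c.toNat : Int) ∧ (c.toNat : Int) ≤ 57)) ||
        (decide (97 ≤ (c.toNat : Int) ∧ (c.toNat : Int) ≤ 102))) := by
  induction l generalizing acc with
  | nil => rfl
  | cons c rest ih =>
      simp only [parseHex6, List.all_cons]
      split_ifs with h1 h2
      · simp [ih, h1]
      · simp [ih, h2]
      · have d1 : (decide (48 ≤ (c.toNat : Int) ∧ (c.toNat : Int) ≤ 57)) = false := decide_eq_false h1
        have d2 : (decide (97 ≤ (c.toNat : Int) ∧ (c.toNat : Int) ≤ 102)) = false := decide_eq_false h2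
        simp only [d1, d2, Bool.false_or, Bool.false_and, Option.isSome_none]

theorem chkLoopA_eq_all (num letter : List Char) (l : List Char) :
    chkLoopA num letter l = l.all (fun c => decide (c ∈ num) || decide (c ∈ letter)) := by
  induction l with
  | nil => rfl
  | cons c rest ih =>
      simp only [chkLoopA, List.all_cons]
      by_cases h1 : c ∈ num <;> by_cases h2 : c ∈ letter <;> simp [h1, h2, ih]

theorem tail_check_eq (l : List Char) :
    chkLoopA ['0', '1', '2', '3', '4', '5', '6', '7', '8', '9'] ['a', 'b', 'c', 'd', 'e', 'f'] l =
      (parseHex6 l 0).isSome := by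
  rw [chkLoopA_eq_all, parseHex6_isSome]
  exact List.all_congr rfl mem_iff_range

-- ===== VERDICT (by name: the statement is the Claim_ definition above) =====
theorem check_hexacolor_spec : Claim_equal_check_hexacolor := by
  intro s _ _
  unfold Spec_check_hexacolor check_hexacolor check_hexacolor_alt
  by_cases hg : ((PySem.Str.pyGet? s 0).getD ' ' ≠ '#') ∨ PySem.Str.len s ≠ 7
  · rw [if_pos hg, if_pos hg]
  · rw [if_neg hg, if_neg hg]
    exact tail_check_eq _
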